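-- pv_equiv track=rewrite | github.com/MelanyAvila/TP-final-progra-1 | por_consola/funciones.py | calcular_flor
-- ===== SOURCE A (Python) =====
-- def calcular_flor(mano) -> int:
--     """
--     Calcula el valor de la flor para una mano.
--
--     Parámetros:
--         mano (list[tuple[int, str]]): La mano del jugador, representada por una lista de tuplas (valor, palo).
--
--     Retorna:
--         int: El valor de la flor si la mano tiene flor, 0 si no.
--     """
--     palos = {}
--     for carta in mano:
--         if carta[1] not in palos:
--             palos[carta[1]] = []
--         palos[carta[1]].append(carta[0])
--     for cartas in palos.values():
--         if len(cartas) >= 3: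
--             return sum(cartas[:3]) + 20
--     return 0
-- ===== SOURCE B (Python) =====
-- def calcular_flor(mano) -> int:
--     """No dict at all: scan the hand; for each card whose suit does not appear
--     earlier in the hand (first appearance), gather that suit's values by a
--     filtered pass; the first such suit with 3+ cards yields the flor."""
--     for i in range(len(mano)):
--         palo = mano[i][1]
--         if all(c[1] != palo for c in mano[:i]):
--             valores = [v for v, p in mano if p == palo]
--             if len(valores) >= 3:
--                 return sum(valores[:3]) + 20
--     return 0
-- ===== Notes on version B (the rewrite author's own statement) =====
-- stated objective: alternative
-- what changed: A builds a dict grouping values per suit and scans the grouped lists; B uses no dict at all: a quadratic scan that detects each suit's first appearance by re-checking the hand prefix and, for the first first-appearing suit with 3+ cards, extracts its values with a filtered pass.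
import Mathlib
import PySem

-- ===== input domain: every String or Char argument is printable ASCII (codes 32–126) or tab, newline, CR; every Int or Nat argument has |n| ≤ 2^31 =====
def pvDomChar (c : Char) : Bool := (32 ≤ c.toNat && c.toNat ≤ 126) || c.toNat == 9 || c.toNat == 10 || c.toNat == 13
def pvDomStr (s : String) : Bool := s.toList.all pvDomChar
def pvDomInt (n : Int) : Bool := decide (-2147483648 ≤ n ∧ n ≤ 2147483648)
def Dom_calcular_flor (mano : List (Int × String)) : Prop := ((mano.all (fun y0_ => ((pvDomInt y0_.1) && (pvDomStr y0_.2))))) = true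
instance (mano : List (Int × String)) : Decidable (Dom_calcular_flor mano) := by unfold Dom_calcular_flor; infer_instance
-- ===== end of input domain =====

-- B drops A's dict grouping entirely: a quadratic first-appearance scan over the hand
-- with a filtered extraction pass (objective: alternative).

-- ===== PORT A =====
-- the scan 'for cartas in palos.values(): if len(cartas) >= 3: return sum(cartas[:3]) + 20' / 'return 0'
def florScanA : List (List Int) → Int
  | [] => 0
  | cartas :: rest =>
      if cartas.length ≥ 3 then (PySem.List.slice cartas none (some 3)).sum + 20
      else florScanA rest

def calcular_flor (mano : List (Int × String)) : Int :=
  let palos : PySem.Dict String (List Int) :=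
    mano.foldl (fun palos carta =>
      let palos := if palos.contains carta.2 then palos else palos.insert carta.2 []
      palos.modify carta.2 [] (fun l => l ++ [carta.1])) PySem.Dict.empty
  florScanA palos.values

-- ===== PORT B =====
-- B's loop 'for i in range(len(mano)): …' as structural recursion on the rest of the
-- hand; 'mano[:i]' is carried as the accumulated prefix 'seen'.
def florGoB (mano : List (Int × String)) : List (Int × String) → List (Int × String) → Int
  | _, [] => 0
  | seen, c :: rest =>
      if seen.all (fun d => d.2 != c.2) then
        let valores := (mano.filter (fun d => d.2 == c.2)).map (·.1)
        if valores.length ≥ 3 then (PySem.List.slice valores none (some 3)).sum + 20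
        else florGoB mano (seen ++ [c]) rest
      else florGoB mano (seen ++ [c]) rest

def calcular_flor_alt (mano : List (Int × String)) : Int :=
  florGoB mano [] mano

-- ===== PRECONDITION & SPEC =====
def Spec_calcular_flor (mano : List (Int × String)) (out : Int) : Prop := out = calcular_flor_alt mano
instance (mano : List (Int × String)) (out : Int) : Decidable (Spec_calcular_flor mano out) := by unfold Spec_calcular_flor; infer_instance

-- ===== CLAIM (what is proved, stated in full; the proofs are below) =====
def Claim_equal_calcular_flor : Prop := ∀ (mano : List (Int × String)), Dom_calcular_flor mano → Spec_calcular_flor mano (calcular_flor mano)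

-- ===== LEMMAS AND PROOFS =====

-- A's per-card step ('if new suit, start []; then append') is one dict-modify.
theorem stepA_eq (d : PySem.Dict String (List Int)) (c : Int × String) :
    (if d.contains c.2 then d else d.insert c.2 []).modify c.2 [] (fun l => l ++ [c.1])
      = d.modify c.2 [] (fun l => l ++ [c.1]) := by
  by_cases h : d.contains c.2
  · simp [h]
  · simp only [h, if_neg, Bool.not_eq_true]
    simp only [PySem.Dict.modify, PySem.Dict.getD_insert_self, PySem.Dict.insert_insert_self,
      PySem.Dict.getD_of_not_contains d ([] : List Int) (by simpa using h)]

-- the grouped values of A's dict, per key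
theorem grpA (mano : List (Int × String)) (k : String) :
    (mano.foldl (fun d c => d.modify c.2 [] (fun l => l ++ [c.1])) PySem.Dict.empty).getD k []
      = (mano.filter (fun c => c.2 == k)).map (·.1) := by
  have := PySem.Dict.getD_foldl_modify_append (mano.map (fun c => (c.2, c.1))) PySem.Dict.empty k
  rw [List.foldl_map] at this
  simpa [List.filter_map, Function.comp] using this

-- the suits of `rest` that do not occur in `seen`, in first-appearance order
def newSuits : List (Int × String) → List (Int × String) → List String
  | _, [] => []
  | seen, c :: rest =>
      if seen.all (fun d => d.2 != c.2) then c.2 :: newSuits (seen ++ [c]) rest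
      else newSuits (seen ++ [c]) rest

-- B's scan is A's value-list scan over the first-appearance suits
theorem goB_eq_scanA (mano : List (Int × String)) :
    ∀ (rest seen : List (Int × String)),
      florGoB mano seen rest
        = florScanA ((newSuits seen rest).map
            (fun k => (mano.filter (fun c => c.2 == k)).map (·.1))) := by
  intro rest
  induction rest with
  | nil => intro seen; rfl
  | cons c r ih =>
      intro seen
      by_cases h : (seen.all (fun d => d.2 != c.2)) = true
      · simp only [florGoB, newSuits, h, if_pos, List.map_cons, florScanA, List.length_map]
        by_cases hl : (mano.filter (fun d => d.2 == c.2)).length ≥ 3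
        · rw [if_pos hl, if_pos hl]
        · rw [if_neg hl, if_neg hl, ih]
      · simp only [florGoB, newSuits, h, if_neg, Bool.false_eq_true, not_false_iff, ih]

-- the first-appearance suits are Python's dict-key set of the suits
theorem newSuits_eq_update :
    ∀ (l seen : List (Int × String)) (s : List String),
      (∀ x, x ∈ seen.map (·.2) ↔ x ∈ s) →
      s ++ newSuits seen l = PySem.Set.update s (l.map (·.2)) := by
  intro l
  induction l with
  | nil => intro seen s _; simp [newSuits, PySem.Set.update]
  | cons c r ih =>
      intro seen s hs
      have hmem : (seen.all (fun d => d.2 != c.2)) = true ↔ ¬ c.2 ∈ s := by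
        simp only [List.all_eq_true, bne_iff_ne, ne_eq, ← hs, List.mem_map]
        constructor
        · rintro h ⟨d, hd, hdc⟩; exact h d hd hdc
        · intro h d hd hdc; exact h ⟨d, hd, hdc⟩
      have hupd : PySem.Set.update s ((c :: r).map (·.2))
          = PySem.Set.update (PySem.Set.add s c.2) (r.map (·.2)) := by
        simp [PySem.Set.update]
      by_cases h : (seen.all (fun d => d.2 != c.2)) = true
      · have hc : ¬ c.2 ∈ s := hmem.mp h
        have hadd : PySem.Set.add s c.2 = s ++ [c.2] := by
          simp [PySem.Set.add, PySem.Set.contains, hc]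
        rw [hupd, hadd]
        have hs' : ∀ x, x ∈ (seen ++ [c]).map (·.2) ↔ x ∈ s ++ [c.2] := by
          intro x; simp [hs x]
        rw [← ih (seen ++ [c]) (s ++ [c.2]) hs']
        simp [newSuits, h]
      · have hc : c.2 ∈ s := by
          by_contra hcn; exact h (hmem.mpr hcn)
        have hadd : PySem.Set.add s c.2 = s := by
          simp [PySem.Set.add, PySem.Set.contains, hc]
        rw [hupd, hadd]
        have hs' : ∀ x, x ∈ (seen ++ [c]).map (·.2) ↔ x ∈ s := by
          intro x; simp [hs x]; intro hx; rw [hx]; exact hc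
        rw [← ih (seen ++ [c]) s hs']
        simp [newSuits, h]

-- ===== VERDICT (by name: the statement is the Claim_ definition above) =====
theorem calcular_flor_spec : Claim_equal_calcular_flor := by
  intro mano _
  unfold Spec_calcular_flor calcular_flor calcular_flor_alt
  have hA : (fun (d : PySem.Dict String (List Int)) (c : Int × String) =>
      (if d.contains c.2 then d else d.insert c.2 []).modify c.2 [] (fun l => l ++ [c.1]))
      = fun d c => d.modify c.2 [] (fun l => l ++ [c.1]) := by
    funext d c; exact stepA_eq d c
  simp only [hA]
  set dA := mano.foldl (fun d c => d.modify c.2 [] (fun l => l ++ [c.1])) PySem.Dict.empty with hdA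
  have hkA : dA.keys = PySem.Set.ofList (mano.map (·.2)) := by
    rw [hdA, PySem.Dict.keys_foldl_modify_key mano (fun c => c.2) [] (fun _ c l => l ++ [c.1])]
    exact PySem.Set.update_empty _
  have hndA : dA.keys.Nodup := by
    rw [hkA]; exact PySem.Set.nodup_ofList _
  rw [PySem.Dict.values_eq_map_keys dA hndA [], hkA]
  have h1 : ∀ k, dA.getD k [] = (mano.filter (fun c => c.2 == k)).map (·.1) := grpA mano
  simp only [h1]
  have hset : newSuits [] mano = PySem.Set.ofList (mano.map (·.2)) := by
    have := newSuits_eq_update mano [] [] (by simp)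
    simpa [PySem.Set.update_empty] using this
  rw [← hset, goB_eq_scanA]
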